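-- pv_equiv track=rewrite | github.com/pyladies-pilsen/ukoly_zacatecnicky_kurz | 07_seznamy/fun_zvirena.py | vytvor_seznamy
-- ===== SOURCE A (Python) =====
-- def vytvor_seznamy(s1, s2):
--
--     s1ms2 = []
--     s2ms1 = []
--     union = []
--     intersection = []
--
--     for item in s1 + s2:
--         if item not in s1:
--             s2ms1.append(item)
--         elif item not in s2:
--             s1ms2.append(item)
--         elif item not in intersection:
--             intersection.append(item)
--
--         if item not in union:
--             union.append(item)
--
--     return s1ms2, s2ms1, intersection, union
-- ===== SOURCE B (Python) =====
-- def _dedup(xs):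
--     out = []
--     for x in xs:
--         if x not in out:
--             out.append(x)
--     return out
--
-- def vytvor_seznamy(s1, s2):
--     s1ms2 = [x for x in s1 if x not in s2]
--     s2ms1 = [x for x in s2 if x not in s1]
--     intersection = _dedup([x for x in s1 if x in s2])
--     union = _dedup(s1 + s2)
--     return s1ms2, s2ms1, intersection, union
-- ===== Notes on version B (the rewrite author's own statement) =====
-- stated objective: simpler
-- what changed: Replaced A's single fused loop over s1+s2 with four independent direct computations: two membership filters for the differences (keeping duplicates) and a first-occurrence dedup helper applied to the filtered intersection and to s1+s2 for the union.
import Mathlib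
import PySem

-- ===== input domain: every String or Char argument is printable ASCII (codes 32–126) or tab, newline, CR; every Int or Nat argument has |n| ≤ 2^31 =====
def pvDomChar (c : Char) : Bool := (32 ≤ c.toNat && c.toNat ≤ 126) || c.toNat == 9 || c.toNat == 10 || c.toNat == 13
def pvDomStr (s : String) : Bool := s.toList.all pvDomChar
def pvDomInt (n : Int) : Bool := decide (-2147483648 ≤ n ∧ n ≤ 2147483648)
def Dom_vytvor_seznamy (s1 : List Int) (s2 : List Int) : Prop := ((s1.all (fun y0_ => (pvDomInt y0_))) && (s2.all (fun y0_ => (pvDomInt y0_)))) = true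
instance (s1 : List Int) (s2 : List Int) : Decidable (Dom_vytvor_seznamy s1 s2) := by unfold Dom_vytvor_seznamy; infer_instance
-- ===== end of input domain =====

-- B replaces A's single fused loop over s1 + s2 with four independent direct computations
-- (two membership filters and two first-occurrence dedups); objective: simpler.

-- shared one-liner: append item unless already present ('if item not in xs: xs.append(item)')
def unionUpd (u : List Int) (item : Int) : List Int :=
  if !u.contains item then u ++ [item] else u

-- ===== PORT A =====
-- the body of A's for-loop: the if/elif/elif chain, then the unconditional union update
def stepA (s1 s2 : List Int) (st : List Int × List Int × List Int × List Int) (item : Int) :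
    List Int × List Int × List Int × List Int :=
  let (s1ms2, s2ms1, inter, union) := st
  if !s1.contains item then (s1ms2, s2ms1 ++ [item], inter, unionUpd union item)
  else if !s2.contains item then (s1ms2 ++ [item], s2ms1, inter, unionUpd union item)
  else if !inter.contains item then (s1ms2, s2ms1, inter ++ [item], unionUpd union item)
  else (s1ms2, s2ms1, inter, unionUpd union item)

def vytvor_seznamy (s1 : List Int) (s2 : List Int) : List Int × List Int × List Int × List Int :=
  (s1 ++ s2).foldl (stepA s1 s2) ([], [], [], [])

-- ===== PORT B =====
-- Source B's _dedup: first-occurrence deduplication, a fold of the 'append unless present' step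
def dedupFold (acc : List Int) (xs : List Int) : List Int :=
  xs.foldl unionUpd acc

def vytvor_seznamy_alt (s1 : List Int) (s2 : List Int) : List Int × List Int × List Int × List Int :=
  ( s1.filter (fun x => !s2.contains x)
  , s2.filter (fun x => !s1.contains x)
  , dedupFold [] (s1.filter (fun x => s2.contains x))
  , dedupFold [] (s1 ++ s2) )

-- ===== PRECONDITION & SPEC =====
def Spec_vytvor_seznamy (s1 : List Int) (s2 : List Int) (out : List Int × List Int × List Int × List Int) : Prop := out = vytvor_seznamy_alt s1 s2
instance (s1 : List Int) (s2 : List Int) (out : List Int × List Int × List Int × List Int) : Decidable (Spec_vytvor_seznamy s1 s2 out) := by unfold Spec_vytvor_seznamy; infer_instance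

-- ===== CLAIM (what is proved, stated in full; the proofs are below) =====
def Claim_equal_vytvor_seznamy : Prop := ∀ (s1 : List Int) (s2 : List Int), Dom_vytvor_seznamy s1 s2 → Spec_vytvor_seznamy s1 s2 (vytvor_seznamy s1 s2)

-- ===== LEMMAS AND PROOFS =====

theorem dedupFold_cons (c : List Int) (y : Int) (l : List Int) :
    dedupFold c (y :: l) = dedupFold (unionUpd c y) l := rfl

theorem mem_dedupFold (c l : List Int) (x : Int) :
    (dedupFold c l).contains x = (c.contains x || l.contains x) := by
  induction l generalizing c with
  | nil => simp [dedupFold]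
  | cons y l ih =>
      rw [dedupFold_cons, ih]
      unfold unionUpd
      by_cases h : y ∈ c
      · by_cases hxy : x = y <;> simp [hxy, h]
      · by_cases hxy : x = y <;> simp [hxy, h, Bool.or_assoc]

-- A's loop over an arbitrary suffix l, with arbitrary accumulators, in closed form
theorem loop_char (s1 s2 l a b c u : List Int) :
    l.foldl (stepA s1 s2) (a, b, c, u)
    = ( a ++ l.filter (fun x => s1.contains x && !s2.contains x)
      , b ++ l.filter (fun x => !s1.contains x)
      , dedupFold c (l.filter (fun x => s1.contains x && s2.contains x))
      , dedupFold u l ) := by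
  induction l generalizing a b c u with
  | nil => simp [dedupFold]
  | cons x l ih =>
      rw [List.foldl_cons]
      by_cases h1 : x ∈ s1
      · by_cases h2 : x ∈ s2
        · by_cases hc : x ∈ c
          · have hs : stepA s1 s2 (a, b, c, u) x = (a, b, c, unionUpd u x) := by
              simp [stepA, h1, h2, hc, unionUpd]
            rw [hs, ih]
            simp [List.filter_cons, h1, h2, hc, dedupFold_cons, unionUpd]
          · have hs : stepA s1 s2 (a, b, c, u) x = (a, b, c ++ [x], unionUpd u x) := by
              simp [stepA, h1, h2, hc, unionUpd]
            rw [hs, ih]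
            simp [List.filter_cons, h1, h2, hc, dedupFold_cons, unionUpd]
        · have hs : stepA s1 s2 (a, b, c, u) x = (a ++ [x], b, c, unionUpd u x) := by
            simp [stepA, h1, h2, unionUpd]
          rw [hs, ih]
          simp [List.filter_cons, h1, h2, List.append_assoc, dedupFold_cons]
      · have hs : stepA s1 s2 (a, b, c, u) x = (a, b ++ [x], c, unionUpd u x) := by
          simp [stepA, h1, unionUpd]
        rw [hs, ih]
        simp [List.filter_cons, h1, List.append_assoc, dedupFold_cons]

theorem dedupFold_absorb (c l : List Int) (h : ∀ x ∈ l, x ∈ c) :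
    dedupFold c l = c := by
  induction l with
  | nil => rfl
  | cons y l ih =>
      rw [dedupFold_cons]
      have hy : y ∈ c := h y (by simp)
      have : unionUpd c y = c := by simp [unionUpd, hy]
      rw [this]
      exact ih (fun x hx => h x (by simp [hx]))

-- ===== VERDICT (by name: the statement is the Claim_ definition above) =====
theorem vytvor_seznamy_spec : Claim_equal_vytvor_seznamy := by
  intro s1 s2 _
  unfold Spec_vytvor_seznamy vytvor_seznamy vytvor_seznamy_alt
  rw [loop_char]
  simp only [List.filter_append, List.nil_append]
  have e1 : s1.filter (fun x => s1.contains x && !s2.contains x)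
      = s1.filter (fun x => !s2.contains x) :=
    List.filter_congr (by intro x hx; simp [hx])
  have e1' : s2.filter (fun x => s1.contains x && !s2.contains x) = [] :=
    List.filter_eq_nil_iff.mpr (by intro x hx; simp [hx])
  have e2 : s1.filter (fun x => !s1.contains x) = [] :=
    List.filter_eq_nil_iff.mpr (by intro x hx; simp [hx])
  have e3 : s1.filter (fun x => s1.contains x && s2.contains x)
      = s1.filter (fun x => s2.contains x) :=
    List.filter_congr (by intro x hx; simp [hx])
  have e4 : dedupFold (dedupFold [] (s1.filter (fun x => s2.contains x)))
      (s2.filter (fun x => s1.contains x && s2.contains x))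
      = dedupFold [] (s1.filter (fun x => s2.contains x)) := by
    apply dedupFold_absorb
    intro x hx
    rw [← List.contains_iff_mem, mem_dedupFold]
    simp only [List.mem_filter, Bool.and_eq_true] at hx
    simp [List.mem_filter, List.contains_iff_mem.mp hx.2.1, List.contains_iff_mem.mp hx.2.2]
  rw [e1, e1', e2, e3, List.append_nil, List.nil_append, dedupFold, List.foldl_append,
    ← dedupFold, ← dedupFold, e4]
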